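-- pv_equiv track=rewrite | github.com/eliottcassidy2000/math | 04-computation/h21_why.py | bits_to_adj
-- ===== SOURCE A (Python) =====
-- def bits_to_adj(n, bits):
--     adj = [0] * n
--     k = 0
--     for i in range(n):
--         for j in range(i+1, n):
--             if bits & (1 << k):
--                 adj[i] |= (1 << j)
--             else:
--                 adj[j] |= (1 << i)
--             k += 1
--     return adj
-- ===== SOURCE B (Python) =====
-- def bits_to_adj(n, bits):
--     def word(v):
--         w = 0
--         for r in range(v):
--             k = r * (2 * n - r - 1) // 2 + (v - r - 1)
--             if not (bits & (1 << k)):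
--                 w |= 1 << r
--         for c in range(v + 1, n):
--             k = v * (2 * n - v - 1) // 2 + (c - v - 1)
--             if bits & (1 << k):
--                 w |= 1 << c
--         return w
--     return [word(v) for v in range(n)]
-- ===== Notes on version B (the rewrite author's own statement) =====
-- stated objective: alternative
-- what changed: B builds each adjacency word independently by gathering the relevant edge bits with a closed-form triangular index k = r*(2n-r-1)//2 + (c-r-1), instead of A's single pass that scatters per-edge updates into a mutable array with a running counter.
import Mathlib
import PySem

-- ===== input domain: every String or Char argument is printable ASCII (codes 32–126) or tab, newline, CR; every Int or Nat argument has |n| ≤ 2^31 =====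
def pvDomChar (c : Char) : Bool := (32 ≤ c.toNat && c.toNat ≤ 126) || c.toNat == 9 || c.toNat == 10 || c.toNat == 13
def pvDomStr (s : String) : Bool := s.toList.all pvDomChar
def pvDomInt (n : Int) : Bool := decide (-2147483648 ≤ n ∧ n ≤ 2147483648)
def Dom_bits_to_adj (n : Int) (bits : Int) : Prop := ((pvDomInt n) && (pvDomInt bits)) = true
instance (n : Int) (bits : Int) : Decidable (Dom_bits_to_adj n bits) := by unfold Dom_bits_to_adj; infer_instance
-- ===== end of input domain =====

-- B rebuilds each adjacency word independently, gathering edge bits via the closed-form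
-- triangular index k = r*(2n-r-1)//2 + (c-r-1), instead of A's scatter pass with a running counter.
-- Objective: alternative decomposition (same O(n^2) cost); both programs are total and agree everywhere.

-- ===== PORT A =====
-- one iteration of A's inner 'for j' body: state is (adj, k)
def pvStepA (bits : Int) (i : Int) (st : List Int × Int) (j : Int) : List Int × Int :=
  if PySem.Int.band bits ((1:Int) <<< st.2.toNat) ≠ 0 then
    (PySem.List.pySetD st.1 i (PySem.Int.bor (PySem.List.pyGetD st.1 i 0) ((1:Int) <<< j.toNat)), st.2 + 1)
  else
    (PySem.List.pySetD st.1 j (PySem.Int.bor (PySem.List.pyGetD st.1 j 0) ((1:Int) <<< i.toNat)), st.2 + 1)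

-- A's outer 'for i' body: the whole inner loop 'for j in range(i+1, n)'
def pvOuterStep (n bits : Int) (st : List Int × Int) (i : Int) : List Int × Int :=
  (PySem.List.pyRange (i+1) n 1).foldl (pvStepA bits i) st

def bits_to_adj (n : Int) (bits : Int) : List Int :=
  ((PySem.List.pyRange 0 n 1).foldl (pvOuterStep n bits) (List.replicate n.toNat 0, 0)).1

-- ===== PORT B =====
-- k = r * (2*n - r - 1) // 2  — start of row r in the edge-bit numbering
def pvTriK (n r : Int) : Int := PySem.Int.floordiv (r * (2*n - r - 1)) 2

-- body of B's 'for r in range(v)' loop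
def pvRStep (n bits v : Int) (w r : Int) : Int :=
  if PySem.Int.band bits ((1:Int) <<< (pvTriK n r + (v - r - 1)).toNat) = 0 then
    PySem.Int.bor w ((1:Int) <<< r.toNat)
  else w

-- body of B's 'for c in range(v+1, n)' loop
def pvCStep (n bits v : Int) (w c : Int) : Int :=
  if PySem.Int.band bits ((1:Int) <<< (pvTriK n v + (c - v - 1)).toNat) ≠ 0 then
    PySem.Int.bor w ((1:Int) <<< c.toNat)
  else w

def pvWord (n bits v : Int) : Int :=
  (PySem.List.pyRange (v+1) n 1).foldl (pvCStep n bits v)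
    ((PySem.List.pyRange 0 v 1).foldl (pvRStep n bits v) 0)

def bits_to_adj_alt (n : Int) (bits : Int) : List Int :=
  (PySem.List.pyRange 0 n 1).map (pvWord n bits)

-- ===== PRECONDITION & SPEC =====
def Spec_bits_to_adj (n : Int) (bits : Int) (out : List Int) : Prop := out = bits_to_adj_alt n bits
instance (n : Int) (bits : Int) (out : List Int) : Decidable (Spec_bits_to_adj n bits out) := by unfold Spec_bits_to_adj; infer_instance

-- ===== CLAIM (what is proved, stated in full; the proofs are below) =====
def Claim_equal_bits_to_adj : Prop := ∀ (n : Int) (bits : Int), Dom_bits_to_adj n bits → Spec_bits_to_adj n bits (bits_to_adj n bits)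

-- ===== LEMMAS AND PROOFS =====

lemma pv_getD_set_self (l : List Int) (t : Nat) (x : Int) (h : t < l.length) :
    (l.set t x).getD t 0 = x := by
  simp [List.getD_eq_getElem?_getD, h]

lemma pv_getD_set_ne (l : List Int) (t s : Nat) (x : Int) (h : t ≠ s) :
    (l.set t x).getD s 0 = l.getD s 0 := by
  simp [List.getD_eq_getElem?_getD, List.getElem?_set_ne h]

lemma pv_getD_replicate (m v : Nat) : (List.replicate m (0:Int)).getD v 0 = 0 := by
  simp [List.getD_eq_getElem?_getD, List.getElem?_replicate]
  split <;> simp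

lemma pvTriK_succ (n r : Int) : pvTriK n (r+1) = pvTriK n r + (n - r - 1) := by
  unfold pvTriK
  rw [PySem.Int.floordiv_eq_ediv_of_pos (by norm_num),
      PySem.Int.floordiv_eq_ediv_of_pos (by norm_num)]
  have h : (r+1) * (2*n - (r+1) - 1) = r * (2*n - r - 1) + (n - r - 1) * 2 := by ring
  rw [h, Int.add_mul_ediv_right _ _ (by norm_num)]

lemma pvTriK_zero (n : Int) : pvTriK n 0 = 0 := by
  unfold pvTriK
  rw [PySem.Int.floordiv_eq_ediv_of_pos (by norm_num)]
  simp

-- A's inner loop, with an arbitrary upper bound for the induction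
def pvRunInner (bits i m : Int) (adj : List Int) (k : Int) : List Int × Int :=
  (PySem.List.pyRange (i+1) m 1).foldl (pvStepA bits i) (adj, k)

lemma innerA_spec (bits i k0 : Int) (hi : 0 ≤ i) (d : Nat) (adj : List Int)
    (hlen : (i + 1 + d).toNat ≤ adj.length) :
      (pvRunInner bits i (i+1+d) adj k0).2 = k0 + d
    ∧ (pvRunInner bits i (i+1+d) adj k0).1.length = adj.length
    ∧ (∀ t : Int, 0 ≤ t → t ≠ i → ¬ (i < t ∧ t < i+1+d) →
        (pvRunInner bits i (i+1+d) adj k0).1.getD t.toNat 0 = adj.getD t.toNat 0)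
    ∧ (pvRunInner bits i (i+1+d) adj k0).1.getD i.toNat 0
        = (PySem.List.pyRange (i+1) (i+1+d) 1).foldl
            (fun w j => if PySem.Int.band bits ((1:Int) <<< (k0 + (j - i - 1)).toNat) ≠ 0
                        then PySem.Int.bor w ((1:Int) <<< j.toNat) else w)
            (adj.getD i.toNat 0)
    ∧ (∀ t : Int, i < t → t < i+1+d →
        (pvRunInner bits i (i+1+d) adj k0).1.getD t.toNat 0
          = if PySem.Int.band bits ((1:Int) <<< (k0 + (t - i - 1)).toNat) = 0
            then PySem.Int.bor (adj.getD t.toNat 0) ((1:Int) <<< i.toNat)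
            else adj.getD t.toNat 0) := by
  induction d with
  | zero =>
    have hnil : PySem.List.pyRange (i+1) (i+1+(0:Nat)) 1 = [] :=
      PySem.List.pyRange_one_eq_nil (by push_cast; omega)
    refine ⟨by simp [pvRunInner, hnil], by simp [pvRunInner, hnil], ?_, by simp [pvRunInner, hnil], ?_⟩
    · intro t _ _ _; simp [pvRunInner, hnil]
    · intro t h1 h2; exfalso; push_cast at h2; omega
  | succ d ih =>
    have hle : (i + 1 + (d:Int)).toNat ≤ adj.length := by
      refine le_trans ?_ hlen; omega
    obtain ⟨ihk, ihlen, ihother, ihrow, ihcol⟩ := ih hle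
    have hm : (i + 1 + ((d:Nat)+1:Nat) : Int) = (i + 1 + d) + 1 := by push_cast; ring
    have hsplit : PySem.List.pyRange (i+1) (i+1+((d:Nat)+1:Nat)) 1
        = PySem.List.pyRange (i+1) (i+1+d) 1 ++ [i+1+d] := by
      rw [hm]; exact PySem.List.pyRange_one_succ_right (by omega)
    set prev := pvRunInner bits i (i+1+(d:Int)) adj k0 with hprev
    have hrun : pvRunInner bits i (i+1+((d:Nat)+1:Nat)) adj k0
        = pvStepA bits i prev (i+1+d) := by
      simp only [pvRunInner, hsplit, List.foldl_append, List.foldl_cons, List.foldl_nil]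
      rfl
    have hkidx : k0 + (i+1+(d:Int) - i - 1) = k0 + d := by ring
    have hilen : i.toNat < prev.1.length := by rw [ihlen]; omega
    have hmlen : (i+1+(d:Int)).toNat < prev.1.length := by rw [ihlen]; omega
    rw [hrun]
    unfold pvStepA
    rw [ihk]
    by_cases hb : PySem.Int.band bits ((1:Int) <<< (k0 + (d:Int)).toNat) ≠ 0
    · -- bit set: adj[i] |= 1 << j
      rw [if_pos hb]
      rw [PySem.List.pySetD_of_nonneg _ _ hi, PySem.List.pyGetD_of_nonneg _ _ hi]
      refine ⟨by push_cast; ring, by simpa using ihlen, ?_, ?_, ?_⟩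
      · intro t ht0 hti htr
        rw [pv_getD_set_ne _ _ _ _ (by omega)]
        exact ihother t ht0 hti (by omega)
      · rw [pv_getD_set_self _ _ _ hilen, hsplit, List.foldl_append]
        simp only [List.foldl_cons, List.foldl_nil]
        have hb' : PySem.Int.band bits ((1:Int) <<< (k0 + (i+1+(d:Int) - i - 1)).toNat) ≠ 0 := by
          rw [hkidx]; exact hb
        rw [if_pos hb', ihrow]
      · intro t hti htm
        by_cases hteq : t = i + 1 + d
        · subst hteq
          rw [pv_getD_set_ne _ _ _ _ (by omega)]
          rw [ihother _ (by omega) (by omega) (by omega)]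
          have : ¬ (PySem.Int.band bits ((1:Int) <<< (k0 + (i+1+(d:Int) - i - 1)).toNat) = 0) := by
            rw [hkidx]; exact hb
          rw [if_neg this]
        · rw [pv_getD_set_ne _ _ _ _ (by omega)]
          exact ihcol t hti (by omega)
    · -- bit clear: adj[j] |= 1 << i
      rw [if_neg hb]
      push_neg at hb
      have hj0 : (0:Int) ≤ i + 1 + d := by omega
      rw [PySem.List.pySetD_of_nonneg _ _ hj0, PySem.List.pyGetD_of_nonneg _ _ hj0]
      refine ⟨by push_cast; ring, by simpa using ihlen, ?_, ?_, ?_⟩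
      · intro t ht0 hti htr
        rw [pv_getD_set_ne _ _ _ _ (by omega)]
        exact ihother t ht0 hti (by omega)
      · rw [pv_getD_set_ne _ _ _ _ (by omega), hsplit, List.foldl_append]
        simp only [List.foldl_cons, List.foldl_nil]
        have : ¬ (PySem.Int.band bits ((1:Int) <<< (k0 + (i+1+(d:Int) - i - 1)).toNat) ≠ 0) := by
          rw [hkidx]; simpa using hb
        rw [if_neg this, ihrow]
      · intro t hti htm
        by_cases hteq : t = i + 1 + d
        · subst hteq
          rw [pv_getD_set_self _ _ _ hmlen]
          rw [ihother _ (by omega) (by omega) (by omega)]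
          have : PySem.Int.band bits ((1:Int) <<< (k0 + (i+1+(d:Int) - i - 1)).toNat) = 0 := by
            rw [hkidx]; exact hb
          rw [if_pos this]
        · rw [pv_getD_set_ne _ _ _ _ (by omega)]
          exact ihcol t hti (by omega)

lemma outerA_spec (n bits : Int) (i : Nat) (hin : (i:Int) ≤ n) :
      ((PySem.List.pyRange 0 i 1).foldl (pvOuterStep n bits) (List.replicate n.toNat 0, 0)).2
        = pvTriK n i
    ∧ ((PySem.List.pyRange 0 i 1).foldl (pvOuterStep n bits) (List.replicate n.toNat 0, 0)).1.length
        = n.toNat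
    ∧ (∀ v : Nat, v < i →
        ((PySem.List.pyRange 0 i 1).foldl (pvOuterStep n bits) (List.replicate n.toNat 0, 0)).1.getD v 0
          = pvWord n bits v)
    ∧ (∀ v : Nat, i ≤ v → v < n.toNat →
        ((PySem.List.pyRange 0 i 1).foldl (pvOuterStep n bits) (List.replicate n.toNat 0, 0)).1.getD v 0
          = (PySem.List.pyRange 0 i 1).foldl (pvRStep n bits v) 0) := by
  induction i with
  | zero =>
    have hnil : PySem.List.pyRange 0 ((0:Nat):Int) 1 = [] :=
      PySem.List.pyRange_one_eq_nil (by norm_num)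
    refine ⟨?_, ?_, ?_, ?_⟩ <;> simp [hnil, pvTriK_zero, pv_getD_replicate]
  | succ i ih =>
    have hin' : (i:Int) ≤ n := by push_cast at hin ⊢; omega
    obtain ⟨ihk, ihlen, ihdone, ihpart⟩ := ih hin'
    have hsplit : PySem.List.pyRange 0 ((i:Nat)+1:Nat) 1
        = PySem.List.pyRange 0 i 1 ++ [(i:Int)] := by
      push_cast
      exact PySem.List.pyRange_one_succ_right (by positivity)
    set prev := (PySem.List.pyRange 0 i 1).foldl (pvOuterStep n bits) (List.replicate n.toNat 0, 0)
      with hprevdef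
    have hrun : (PySem.List.pyRange 0 ((i:Nat)+1:Nat) 1).foldl (pvOuterStep n bits)
          (List.replicate n.toNat 0, 0)
        = pvRunInner bits i n prev.1 prev.2 := by
      rw [hsplit, List.foldl_append]
      simp only [List.foldl_cons, List.foldl_nil]
      rfl
    have hd : (i:Int) + 1 + (((n - i - 1).toNat : Nat) : Int) = n := by
      push_cast at hin ⊢; omega
    have hlen' : ((i:Int) + 1 + ((n - i - 1).toNat : Nat)).toNat ≤ prev.1.length := by
      rw [ihlen]; omega
    obtain ⟨jk, jlen, jother, jrow, jcol⟩ :=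
      innerA_spec bits i prev.2 (by positivity) ((n - i - 1).toNat) prev.1 hlen'
    rw [hd] at jk jlen jother jrow jcol
    rw [hrun]
    refine ⟨?_, ?_, ?_, ?_⟩
    · rw [jk, ihk]
      have : pvTriK n ((i:Nat)+1:Nat) = pvTriK n i + (n - i - 1) := by
        push_cast; rw [pvTriK_succ]
      rw [this]; omega
    · rw [jlen, ihlen]
    · intro v hv
      rcases Nat.lt_succ_iff_lt_or_eq.mp hv with hv' | hv'
      · have := jother v (by positivity) (by omega) (by push_cast; omega)
        rw [show ((v:Int)).toNat = v from Int.toNat_natCast v] at this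
        rw [this]
        exact ihdone v hv'
      · rw [hv']
        have := jrow
        rw [show ((i:Int)).toNat = i from Int.toNat_natCast i] at this
        rw [this, ihk, ihpart i (le_refl i) (by omega)]
        rfl
    · intro v hiv hvn
      have := jcol v (by exact_mod_cast hiv) (by omega)
      rw [show ((v:Int)).toNat = v from Int.toNat_natCast v] at this
      rw [this, ihk, ihpart v (by omega) hvn]
      rw [hsplit, List.foldl_append]
      simp only [List.foldl_cons, List.foldl_nil]
      unfold pvRStep
      rw [show ((i:Int)).toNat = i from Int.toNat_natCast i]

-- ===== VERDICT (by name: the statement is the Claim_ definition above) =====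
theorem bits_to_adj_spec : Claim_equal_bits_to_adj := by
  intro n bits _
  unfold Spec_bits_to_adj bits_to_adj bits_to_adj_alt
  by_cases hn : n ≤ 0
  · have hnil : PySem.List.pyRange 0 n 1 = [] := PySem.List.pyRange_one_eq_nil hn
    simp [hnil, Int.toNat_of_nonpos hn]
  · push_neg at hn
    have hcast : ((n.toNat : Nat) : Int) = n := Int.toNat_of_nonneg (le_of_lt hn)
    obtain ⟨-, hlen, hdone, -⟩ := outerA_spec n bits n.toNat (by omega)
    rw [hcast] at hlen hdone
    apply List.ext_getElem
    · rw [hlen]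
      simp [PySem.List.length_pyRange_one]
    · intro v h1 h2
      rw [← List.getD_eq_getElem _ 0 h1]
      have hvn : v < n.toNat := by rw [hlen] at h1; exact h1
      rw [hdone v hvn, List.getElem_map, PySem.List.getElem_pyRange_one]
      simp
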